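-- pv_equiv track=rewrite | github.com/thehalleyyoung/deppy | src/deppy/hybrid/core/checker.py | _unify_element_sorts
-- ===== SOURCE A (Python) =====
-- from typing import (
--     TYPE_CHECKING,
--     Any,
--     Callable,
--     Dict,
--     FrozenSet,
--     List,
--     Mapping,
--     Optional,
--     Sequence,
--     Set,
--     Tuple,
--     Union,
-- )
--
-- def _unify_element_sorts(element_types: List[Dict[str, Any]]) -> str:
--     """Find the least upper bound of sorts for a homogeneous collection."""
--     if not element_types:
--         return "BOTTOM"
--     sorts = {et.get("sort", "OPAQUE") for et in element_types}
--     if len(sorts) == 1: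
--         return sorts.pop()
--     if sorts <= {"INT", "REAL"}:
--         return "REAL"
--     if sorts <= {"INT", "REAL", "BOOL"}:
--         return "REAL"
--     return "TOP"
-- ===== SOURCE B (Python) =====
-- def _unify_element_sorts(element_types):
--     """Find the least upper bound of sorts for a homogeneous collection."""
--     def join(a, b):
--         if a == b:
--             return a
--         numeric = ("INT", "REAL", "BOOL")
--         if a in numeric and b in numeric:
--             return "REAL"
--         return "TOP"
--
--     acc = "BOTTOM"
--     first = True
--     for et in element_types:
--         s = et.get("sort", "OPAQUE")
--         if first:
--             acc = s
--             first = False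
--         else:
--             acc = join(acc, s)
--     return acc
-- ===== Notes on version B (the rewrite author's own statement) =====
-- stated objective: alternative
-- what changed: Replaced the build-a-set-then-subset-test logic by a single pass folding a pairwise absorbing join (a==b -> a; both numeric -> REAL; else TOP) over the element sorts, starting from the first sort.
import Mathlib
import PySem

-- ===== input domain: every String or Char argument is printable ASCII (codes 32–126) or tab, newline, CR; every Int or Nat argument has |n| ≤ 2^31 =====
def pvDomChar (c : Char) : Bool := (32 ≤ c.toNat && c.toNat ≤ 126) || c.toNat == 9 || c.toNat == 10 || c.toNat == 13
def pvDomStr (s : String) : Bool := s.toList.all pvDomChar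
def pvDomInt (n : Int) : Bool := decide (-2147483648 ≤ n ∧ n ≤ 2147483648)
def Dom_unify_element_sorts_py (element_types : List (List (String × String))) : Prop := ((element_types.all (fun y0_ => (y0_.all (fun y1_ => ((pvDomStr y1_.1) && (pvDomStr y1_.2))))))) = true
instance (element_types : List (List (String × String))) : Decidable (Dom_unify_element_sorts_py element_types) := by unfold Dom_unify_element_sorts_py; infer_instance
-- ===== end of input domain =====

-- B replaces A's distinct-sort set and subset tests by a single-pass fold of a pairwise
-- absorbing join over the element sorts (objective: alternative decomposition, same cost).

-- ===== PORT A =====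
-- et.get("sort", "OPAQUE") on an element dict (shared by both ports)
def pvSortOf (et : List (String × String)) : String :=
  (PySem.Dict.mk et).getD "sort" "OPAQUE"

def unify_element_sorts_py (element_types : List (List (String × String))) : String :=
  if element_types = [] then "BOTTOM"
  else
    let sorts : PySem.Set String := PySem.Set.ofList (element_types.map pvSortOf)
    if PySem.Set.len sorts = 1 then sorts.headD ""   -- sorts.pop() on a singleton set: its unique element
    else if PySem.Set.issubset sorts ["INT", "REAL"] then "REAL"
    else if PySem.Set.issubset sorts ["INT", "REAL", "BOOL"] then "REAL"
    else "TOP"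

-- ===== PORT B =====
def pvJoin (a b : String) : String :=
  if a = b then a
  else if (a = "INT" ∨ a = "REAL" ∨ a = "BOOL") ∧ (b = "INT" ∨ b = "REAL" ∨ b = "BOOL") then "REAL"
  else "TOP"

def unify_element_sorts_py_alt (element_types : List (List (String × String))) : String :=
  (element_types.foldl
    (fun (st : String × Bool) et =>
      let s := pvSortOf et
      if st.2 then (s, false) else (pvJoin st.1 s, false))
    ("BOTTOM", true)).1

-- ===== PRECONDITION & SPEC =====
def Spec_unify_element_sorts_py (element_types : List (List (String × String))) (out : String) : Prop := out = unify_element_sorts_py_alt element_types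
instance (element_types : List (List (String × String))) (out : String) : Decidable (Spec_unify_element_sorts_py element_types out) := by unfold Spec_unify_element_sorts_py; infer_instance

-- ===== CLAIM (what is proved, stated in full; the proofs are below) =====
def Claim_equal_unify_element_sorts_py : Prop := ∀ (element_types : List (List (String × String))), Dom_unify_element_sorts_py element_types → Spec_unify_element_sorts_py element_types (unify_element_sorts_py element_types)

-- ===== LEMMAS AND PROOFS =====

-- "s is one of the numeric sorts" (proof-side abbreviation)
def pvNumB (s : String) : Bool := s == "INT" || s == "REAL" || s == "BOOL"

theorem pvNumB_iff (s : String) : pvNumB s = true ↔ (s = "INT" ∨ s = "REAL" ∨ s = "BOOL") := by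
  simp [pvNumB]; tauto

-- characterisation of B's pairwise-join fold
theorem foldl_pvJoin (l : List String) (a : String) :
    l.foldl pvJoin a =
      if ∀ x ∈ l, x = a then a
      else if pvNumB a = true ∧ ∀ x ∈ l, pvNumB x = true then "REAL"
      else "TOP" := by
  induction l generalizing a with
  | nil => simp
  | cons x t ih =>
    simp only [List.foldl_cons, ih (pvJoin a x), List.forall_mem_cons]
    unfold pvJoin
    by_cases hax : a = x
    · subst hax
      split_ifs <;> first | rfl | tauto
    · have hxa : ¬ (x = a) := fun h => hax h.symm
      simp only [if_neg hax, ← pvNumB_iff]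
      by_cases hN : pvNumB a = true ∧ pvNumB x = true
      · have hR : pvNumB "REAL" = true := by decide
        have key : (∀ y ∈ t, y = "REAL") → ∀ y ∈ t, pvNumB y = true :=
          fun h y hy => (h y hy) ▸ hR
        have hNa := hN.1
        have hNx := hN.2
        simp only [if_pos hN]
        split_ifs <;> first | rfl | tauto
      · have hT : ¬ pvNumB "TOP" = true := by decide
        simp only [if_neg hN]
        split_ifs <;> first | rfl | tauto

-- after the first element the flag is false and the loop is a plain join-fold
theorem foldl_flag_false (r : List (List (String × String))) (a : String) :
    (r.foldl
      (fun (st : String × Bool) et =>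
        let s := pvSortOf et
        if st.2 then (s, false) else (pvJoin st.1 s, false))
      (a, false)).1 = (r.map pvSortOf).foldl pvJoin a := by
  induction r generalizing a with
  | nil => rfl
  | cons e r ih => simpa using ih (pvJoin a (pvSortOf e))

theorem alt_cons (e : List (String × String)) (r : List (List (String × String))) :
    unify_element_sorts_py_alt (e :: r) = (r.map pvSortOf).foldl pvJoin (pvSortOf e) := by
  unfold unify_element_sorts_py_alt
  simpa using foldl_flag_false r (pvSortOf e)

-- the set of sorts is a singleton iff every later sort equals the first
theorem len_ofList_cons_eq_one (s : String) (ls : List String) :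
    PySem.Set.len (PySem.Set.ofList (s :: ls)) = 1 ↔ ∀ y ∈ ls, y = s := by
  rw [PySem.Set.ofList_cons]
  unfold PySem.Set.len
  simp only [List.length_cons]
  constructor
  · intro h y hy
    have hnil : (PySem.Set.ofList ls).discard s = [] := by
      cases hd : (PySem.Set.ofList ls).discard s with
      | nil => rfl
      | cons z zs => rw [hd] at h; simp at h; omega
    by_contra hne
    have : y ∈ (PySem.Set.ofList ls).discard s := by
      rw [PySem.Set.mem_discard]
      exact ⟨(PySem.Set.mem_ofList ls y).mpr hy, hne⟩
    rw [hnil] at this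
    exact absurd this (List.not_mem_nil)
  · intro h
    have hnil : (PySem.Set.ofList ls).discard s = [] := by
      apply List.eq_nil_iff_forall_not_mem.mpr
      intro y hy
      rw [PySem.Set.mem_discard] at hy
      exact hy.2 (h y ((PySem.Set.mem_ofList ls y).mp hy.1))
    rw [hnil]
    rfl

-- characterisation of A's set-and-subset-test branch chain on a nonempty sort list
theorem A_branches (s : String) (ls : List String) :
    (if PySem.Set.len (PySem.Set.ofList (s :: ls)) = 1 then (PySem.Set.ofList (s :: ls)).headD ""
     else if PySem.Set.issubset (PySem.Set.ofList (s :: ls)) ["INT", "REAL"] then "REAL"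
     else if PySem.Set.issubset (PySem.Set.ofList (s :: ls)) ["INT", "REAL", "BOOL"] then "REAL"
     else "TOP")
    = if ∀ y ∈ ls, y = s then s
      else if pvNumB s = true ∧ ∀ x ∈ ls, pvNumB x = true then "REAL"
      else "TOP" := by
  have hmem : ∀ x, x ∈ PySem.Set.ofList (s :: ls) ↔ (x = s ∨ x ∈ ls) := by
    intro x
    rw [PySem.Set.mem_ofList]
    simp
  by_cases h1 : ∀ y ∈ ls, y = s
  · rw [if_pos ((len_ofList_cons_eq_one s ls).mpr h1), if_pos h1, PySem.Set.ofList_cons]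
    rfl
  · rw [if_neg (fun h => h1 ((len_ofList_cons_eq_one s ls).mp h)), if_neg h1]
    by_cases h2 : pvNumB s = true ∧ ∀ x ∈ ls, pvNumB x = true
    · rw [if_pos h2]
      by_cases h3 : PySem.Set.issubset (PySem.Set.ofList (s :: ls)) ["INT", "REAL"] = true
      · rw [if_pos h3]
      · rw [if_neg h3, if_pos]
        rw [PySem.Set.issubset_iff]
        intro x hx
        have hx' : pvNumB x = true := by
          rcases (hmem x).mp hx with h | h
          · exact h ▸ h2.1
          · exact h2.2 x h
        rw [pvNumB_iff] at hx'
        simpa using hx'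
    · rw [if_neg h2]
      have hfail : ∀ L : List String, (∀ x ∈ L, pvNumB x = true) →
          ¬ PySem.Set.issubset (PySem.Set.ofList (s :: ls)) L = true := by
        intro L hL hsub
        rw [PySem.Set.issubset_iff] at hsub
        exact h2 ⟨hL s (hsub s ((hmem s).mpr (Or.inl rfl))),
                  fun x hx => hL x (hsub x ((hmem x).mpr (Or.inr hx)))⟩
      rw [if_neg (hfail _ (by decide)), if_neg (hfail _ (by decide))]

-- ===== VERDICT (by name: the statement is the Claim_ definition above) =====
theorem unify_element_sorts_py_spec : Claim_equal_unify_element_sorts_py := by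
  intro ets _
  show unify_element_sorts_py ets = unify_element_sorts_py_alt ets
  cases ets with
  | nil => rfl
  | cons e r =>
    rw [alt_cons, foldl_pvJoin]
    unfold unify_element_sorts_py
    rw [if_neg (by simp)]
    simp only [List.map_cons]
    exact A_branches (pvSortOf e) (r.map pvSortOf)
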